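-- pv_equiv track=rewrite | github.com/Ryz3D/generate_exam2 | environments/_envhelper.py | symbol_to_tex
-- ===== SOURCE A (Python) =====
-- def symbol_to_tex(sym):
--     tex = ""
--
--     for g in ["alpha", "beta", "gamma", "delta", "epsilon", "zeta", "eta", "theta", "iota", "kappa", "lambda", "mu", "nu", "xi", "omicron", "pi", "rho", "sigma", "tau", "upsilon", "phi", "chi", "psi", "omega"]:
--         if sym.lower().startswith(g):
--             tex = "\\"
--
--     level = 0
--
--     for ci in range(len(sym)):
--         if sym[ci] == "^":
--             tex += "}" * level
--             level = 0
--             tex += "^{" + symbol_to_tex(sym[ci + 1:]) + "}"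
--             break
--         elif sym[ci] == "_":
--             tex += "_{"
--             level += 1
--         else:
--             tex += sym[ci]
--
--     return tex + "}" * level
-- ===== SOURCE B (Python) =====
-- GREEK = ["alpha", "beta", "gamma", "delta", "epsilon", "zeta", "eta", "theta", "iota", "kappa", "lambda", "mu", "nu", "xi", "omicron", "pi", "rho", "sigma", "tau", "upsilon", "phi", "chi", "psi", "omega"]
--
-- def _fmt(seg):
--     prefix = "\\" if any(seg.lower().startswith(g) for g in GREEK) else ""
--     parts = []
--     depth = 0
--     for c in seg:
--         if c == "_":
--             parts.append("_{")
--             depth += 1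
--         else:
--             parts.append(c)
--     return prefix + "".join(parts) + "}" * depth
--
-- def symbol_to_tex(sym):
--     # one left-to-right pass splitting on "^" into already-formatted segments
--     segs = []
--     cur = ""
--     for c in sym:
--         if c == "^":
--             segs.append(_fmt(cur))
--             cur = ""
--         else:
--             cur += c
--     segs.append(_fmt(cur))
--     # rebuild the "^" nesting back-to-front with a right fold
--     out = segs[-1]
--     for s in reversed(segs[:-1]):
--         out = s + "^{" + out + "}"
--     return out
-- ===== Notes on version B (the rewrite author's own statement) =====
-- stated objective: alternative
-- what changed: A rebuilds the tail recursively at every '^' (re-scanning each suffix and recomputing the greek prefix per recursive call); B makes one iterative left-to-right pass that splits the symbol into '^'-segments, formats each segment on its own (greek prefix + underscore braces), and rebuilds the '^' nesting with a right fold over the segment list.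
import Mathlib
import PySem

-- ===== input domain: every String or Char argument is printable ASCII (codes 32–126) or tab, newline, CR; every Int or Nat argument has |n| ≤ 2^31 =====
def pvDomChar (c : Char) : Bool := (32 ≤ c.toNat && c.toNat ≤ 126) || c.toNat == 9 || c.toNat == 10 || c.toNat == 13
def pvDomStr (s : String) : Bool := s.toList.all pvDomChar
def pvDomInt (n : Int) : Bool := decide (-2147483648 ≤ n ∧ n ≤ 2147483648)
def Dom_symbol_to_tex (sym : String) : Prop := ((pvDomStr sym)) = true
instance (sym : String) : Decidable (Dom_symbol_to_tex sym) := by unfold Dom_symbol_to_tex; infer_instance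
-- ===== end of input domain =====

-- B replaces A's re-scanning recursion at every '^' with one left-to-right split into
-- formatted segments plus a right fold rebuilding the '^' nesting (alternative decomposition).

-- the greek names both versions test for
def pvGreek : List (List Char) :=
  ["alpha".toList, "beta".toList, "gamma".toList, "delta".toList, "epsilon".toList,
   "zeta".toList, "eta".toList, "theta".toList, "iota".toList, "kappa".toList,
   "lambda".toList, "mu".toList, "nu".toList, "xi".toList, "omicron".toList,
   "pi".toList, "rho".toList, "sigma".toList, "tau".toList, "upsilon".toList,
   "phi".toList, "chi".toList, "psi".toList, "omega".toList]

-- "}" * n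
def pvBraces (n : Nat) : List Char := List.replicate n '}'

-- ===== PORT A =====
-- the greek loop of A: tex is overwritten with "\" on every matching name
def pvGreekPrefA (cs : List Char) : List Char :=
  pvGreek.foldl
    (fun tex g => if PySem.Chars.startswith (PySem.Chars.lower cs) g then ['\\'] else tex) []

mutual
  -- A's body: greek loop, then the character loop with the break at '^'
  def pvTexA (cs : List Char) : List Char :=
    pvLoopA cs (pvGreekPrefA cs) 0
  termination_by (cs.length, 1)

  -- A's for-loop over the characters; the '^' branch breaks (level already reset to 0)
  def pvLoopA : List Char → List Char → Nat → List Char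
    | [], tex, level => tex ++ pvBraces level
    | c :: rest, tex, level =>
      if c = '^' then tex ++ pvBraces level ++ ['^', '{'] ++ pvTexA rest ++ ['}']
      else if c = '_' then pvLoopA rest (tex ++ ['_', '{']) (level + 1)
      else pvLoopA rest (tex ++ [c]) level
  termination_by cs _ _ => (cs.length, 0)
end

def symbol_to_tex (sym : String) : String := String.ofList (pvTexA sym.toList)

-- ===== PORT B =====
-- Source B's _fmt: greek prefix, then one pass turning '_' into "_{" while counting depth
def pvFmtSeg (seg : List Char) : List Char :=
  let pre := if pvGreek.any (fun g => PySem.Chars.startswith (PySem.Chars.lower seg) g)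
             then ['\\'] else []
  let pd := seg.foldl
      (fun (acc : List Char × Nat) c =>
        if c = '_' then (acc.1 ++ ['_', '{'], acc.2 + 1) else (acc.1 ++ [c], acc.2))
      ([], 0)
  pre ++ pd.1 ++ pvBraces pd.2

-- Source B's splitting loop: collect formatted segments, accumulating the current segment
def pvSegsB : List Char → List Char → List (List Char)
  | [], cur => [pvFmtSeg cur]
  | c :: rest, cur =>
    if c = '^' then pvFmtSeg cur :: pvSegsB rest [] else pvSegsB rest (cur ++ [c])

-- Source B's reversed join loop = right fold over all but the last segment
def pvJoinB (segs : List (List Char)) : List Char :=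
  segs.dropLast.foldr (fun s out => s ++ ['^', '{'] ++ out ++ ['}']) (segs.getLastD [])

def symbol_to_tex_alt (sym : String) : String :=
  String.ofList (pvJoinB (pvSegsB sym.toList []))

-- ===== PRECONDITION & SPEC =====
def Spec_symbol_to_tex (sym : String) (out : String) : Prop := out = symbol_to_tex_alt sym
instance (sym : String) (out : String) : Decidable (Spec_symbol_to_tex sym out) := by
  unfold Spec_symbol_to_tex; infer_instance

-- ===== CLAIM (what is proved, stated in full; the proofs are below) =====
def Claim_equal_symbol_to_tex : Prop :=
  ∀ (sym : String), Dom_symbol_to_tex sym → Spec_symbol_to_tex sym (symbol_to_tex sym)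

-- ===== LEMMAS AND PROOFS =====

-- raw split of the input on '^' (proof-only characterisation shared by both programs)
def pvSegsRaw : List Char → List (List Char)
  | [] => [[]]
  | c :: r =>
    if c = '^' then [] :: pvSegsRaw r
    else
      match pvSegsRaw r with
      | s :: ss => (c :: s) :: ss
      | [] => [[c]]

def pvTrans (seg : List Char) : List Char :=
  seg.flatMap (fun c => if c = '_' then ['_', '{'] else [c])

def pvUdep (seg : List Char) : Nat := seg.countP (· = '_')

theorem pvSegsRaw_ne_nil (cs : List Char) : pvSegsRaw cs ≠ [] := by
  cases cs with
  | nil => simp [pvSegsRaw]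
  | cons c r =>
    simp only [pvSegsRaw]
    split_ifs
    · simp
    · cases h : pvSegsRaw r <;> simp

-- the pair fold in pvFmtSeg computes (pvTrans, pvUdep)
theorem pvFold_eq (seg : List Char) :
    ∀ p d, seg.foldl
      (fun (acc : List Char × Nat) c =>
        if c = '_' then (acc.1 ++ ['_', '{'], acc.2 + 1) else (acc.1 ++ [c], acc.2))
      (p, d) = (p ++ pvTrans seg, d + pvUdep seg) := by
  induction seg with
  | nil => simp [pvTrans, pvUdep]
  | cons c s ih =>
    intro p d
    simp only [List.foldl_cons]
    by_cases hc : c = '_' <;>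
      simp [hc, ih, pvTrans, pvUdep, List.countP_cons, List.append_assoc] <;> omega

-- A's overwrite-fold over the greek list is an 'any'
theorem pvFoldOverwrite (gs : List (List Char)) (c : List Char → Bool) (X : List Char) :
    ∀ init, gs.foldl (fun t g => if c g then X else t) init =
      if gs.any c then X else init := by
  induction gs with
  | nil => simp
  | cons g gs ih =>
    intro init
    simp only [List.foldl_cons, List.any_cons, ih]
    by_cases h : c g = true <;> by_cases h2 : gs.any c = true <;> simp [h, h2]

theorem pvPrefix_split {p ls lt : List Char} (h : '^' ∉ p) :
    (p <+: ls ++ '^' :: lt) ↔ p <+: ls := by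
  constructor
  · intro hp
    induction ls generalizing p with
    | nil =>
      cases p with
      | nil => exact List.nil_prefix
      | cons x q =>
        rw [List.nil_append, List.cons_prefix_cons] at hp
        exact absurd (hp.1 ▸ List.mem_cons_self) h
    | cons a ls' ih =>
      cases p with
      | nil => exact List.nil_prefix
      | cons x q =>
        rw [List.cons_append, List.cons_prefix_cons] at hp
        rcases hp with ⟨rfl, hq⟩
        exact List.cons_prefix_cons.mpr ⟨rfl, ih (fun hm => h (List.mem_cons_of_mem _ hm)) hq⟩
  · intro hp
    exact hp.trans (List.prefix_append _ _)

theorem pvGreek_no_caret : ∀ g ∈ pvGreek, '^' ∉ g := by decide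

-- the greek test on the whole string only sees the first segment
theorem pvStartsSplit (s t g : List Char) (hg : '^' ∉ g) :
    PySem.Chars.startswith (PySem.Chars.lower (s ++ '^' :: t)) g =
      PySem.Chars.startswith (PySem.Chars.lower s) g := by
  have hmap : PySem.Chars.lower (s ++ '^' :: t) =
      PySem.Chars.lower s ++ '^' :: PySem.Chars.lower t := by
    simp [PySem.Chars.lower, PySem.Chars.lowerChar, PySem.Chars.isupper]
  rw [hmap]
  have key := pvPrefix_split (ls := PySem.Chars.lower s) (lt := PySem.Chars.lower t) hg
  by_cases h : g <+: PySem.Chars.lower s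
  · rw [(PySem.Chars.startswith_iff _ _).mpr (key.mpr h),
        (PySem.Chars.startswith_iff _ _).mpr h]
  · have e1 : PySem.Chars.startswith
        (PySem.Chars.lower s ++ '^' :: PySem.Chars.lower t) g = false :=
      Bool.eq_false_iff.mpr
        (fun hc => h (key.mp ((PySem.Chars.startswith_iff _ _).mp hc)))
    have e2 : PySem.Chars.startswith (PySem.Chars.lower s) g = false :=
      Bool.eq_false_iff.mpr (fun hc => h ((PySem.Chars.startswith_iff _ _).mp hc))
    rw [e1, e2]

theorem pvGreekPrefA_eq_any (cs : List Char) :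
    pvGreekPrefA cs =
      if pvGreek.any (fun g => PySem.Chars.startswith (PySem.Chars.lower cs) g)
      then ['\\'] else [] := by
  simp [pvGreekPrefA, pvFoldOverwrite]

theorem pvGreekPrefA_split (s t : List Char) :
    pvGreekPrefA (s ++ '^' :: t) = pvGreekPrefA s := by
  rw [pvGreekPrefA_eq_any, pvGreekPrefA_eq_any]
  have h : pvGreek.any (fun g => PySem.Chars.startswith (PySem.Chars.lower (s ++ '^' :: t)) g)
      = pvGreek.any (fun g => PySem.Chars.startswith (PySem.Chars.lower s) g) :=
    PySem.List.any_congr_mem (fun g hg => pvStartsSplit s t g (pvGreek_no_caret g hg))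
  rw [h]

theorem pvFmtSeg_eq (seg : List Char) :
    pvFmtSeg seg = pvGreekPrefA seg ++ pvTrans seg ++ pvBraces (pvUdep seg) := by
  rw [pvGreekPrefA_eq_any]
  simp [pvFmtSeg, pvFold_eq]

-- A's loop on a caret-free tail of characters
theorem pvLoopA_free (seg : List Char) (hs : '^' ∉ seg) :
    ∀ tex level, pvLoopA seg tex level =
      tex ++ pvTrans seg ++ pvBraces (level + pvUdep seg) := by
  induction seg with
  | nil => intro tex level; simp [pvLoopA, pvTrans, pvUdep]
  | cons c s ih =>
    intro tex level
    have hc : c ≠ '^' := fun h => hs (h ▸ List.mem_cons_self)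
    have hs' : '^' ∉ s := fun h => hs (List.mem_cons_of_mem _ h)
    have harep : ∀ a b : Nat, pvBraces (a + 1 + b) = pvBraces (a + (b + 1)) := by
      intro a b
      have h : a + 1 + b = a + (b + 1) := by omega
      rw [h]
    by_cases hu : c = '_' <;>
      simp [pvLoopA, hc, hu, ih hs', pvTrans, pvUdep, List.countP_cons,
            List.append_assoc, harep]

-- A's loop up to the first '^': emits the segment, closes its braces, recurses on the tail
theorem pvLoopA_caret (seg : List Char) (hs : '^' ∉ seg) :
    ∀ t tex level, pvLoopA (seg ++ '^' :: t) tex level =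
      tex ++ pvTrans seg ++ pvBraces (level + pvUdep seg) ++
        ['^', '{'] ++ pvTexA t ++ ['}'] := by
  induction seg with
  | nil =>
    intro t tex level
    simp [pvLoopA, pvTrans, pvUdep, List.append_assoc]
  | cons c s ih =>
    intro t tex level
    have hc : c ≠ '^' := fun h => hs (h ▸ List.mem_cons_self)
    have hs' : '^' ∉ s := fun h => hs (List.mem_cons_of_mem _ h)
    have harep : ∀ a b : Nat, pvBraces (a + 1 + b) = pvBraces (a + (b + 1)) := by
      intro a b
      have h : a + 1 + b = a + (b + 1) := by omega
      rw [h]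
    by_cases hu : c = '_' <;>
      simp [pvLoopA, hc, hu, ih hs', pvTrans, pvUdep, List.countP_cons,
            List.append_assoc, harep]

-- every string is either caret-free or splits at its first '^'
theorem pvSegsRaw_cases (cs : List Char) :
    ('^' ∉ cs ∧ pvSegsRaw cs = [cs]) ∨
      ∃ s t, cs = s ++ '^' :: t ∧ '^' ∉ s ∧ pvSegsRaw cs = s :: pvSegsRaw t := by
  induction cs with
  | nil => left; exact ⟨by simp, by simp [pvSegsRaw]⟩
  | cons c r ih =>
    by_cases hc : c = '^'
    · right
      exact ⟨[], r, by simp [hc], by simp, by simp [pvSegsRaw, hc]⟩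
    · have hc' : ¬ ('^' = c) := fun h => hc h.symm
      rcases ih with ⟨hfree, heq⟩ | ⟨s, t, rfl, hfree, heq⟩
      · left
        refine ⟨by simp [hc', hfree], ?_⟩
        simp only [pvSegsRaw, hc, if_false, heq]
      · right
        refine ⟨c :: s, t, by simp, by simp [hc', hfree], ?_⟩
        simp only [pvSegsRaw, List.cons_append]
        rw [if_neg hc, heq]

-- B's splitting loop, characterised through pvSegsRaw
theorem pvSegsB_eq (cs : List Char) :
    ∀ cur s0 ss, pvSegsRaw cs = s0 :: ss →
      pvSegsB cs cur = pvFmtSeg (cur ++ s0) :: ss.map pvFmtSeg := by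
  induction cs with
  | nil =>
    intro cur s0 ss h
    simp only [pvSegsRaw] at h
    cases h
    simp [pvSegsB]
  | cons c r ih =>
    intro cur s0 ss h
    by_cases hc : c = '^'
    · simp only [pvSegsRaw, hc, if_true, if_pos rfl] at h
      cases h
      obtain ⟨r0, rs, hr⟩ := List.exists_cons_of_ne_nil (pvSegsRaw_ne_nil r)
      simp [pvSegsB, hc, ih [] r0 rs hr, hr]
    · simp only [pvSegsRaw, hc, if_false] at h
      obtain ⟨r0, rs, hr⟩ := List.exists_cons_of_ne_nil (pvSegsRaw_ne_nil r)
      rw [hr] at h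
      simp only [List.cons.injEq] at h
      obtain ⟨h1, h2⟩ := h
      subst h1; subst h2
      simp only [pvSegsB, hc, if_false]
      rw [ih (cur ++ [c]) r0 rs hr]
      simp [List.append_assoc]

theorem pvJoinB_single (a : List Char) : pvJoinB [a] = a := by
  simp [pvJoinB]

theorem pvJoinB_cons (a : List Char) (ss : List (List Char)) (h : ss ≠ []) :
    pvJoinB (a :: ss) = a ++ ['^', '{'] ++ pvJoinB ss ++ ['}'] := by
  obtain ⟨b, bs, rfl⟩ := List.exists_cons_of_ne_nil h
  simp [pvJoinB, List.dropLast_cons_of_ne_nil, List.getLastD_cons]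

-- main invariant: A's recursion equals B's split-format-join
theorem pvMain : ∀ (n : Nat) (cs : List Char), cs.length ≤ n →
    pvTexA cs = pvJoinB ((pvSegsRaw cs).map pvFmtSeg) := by
  intro n
  induction n with
  | zero =>
    intro cs hlen
    have : cs = [] := List.eq_nil_of_length_eq_zero (Nat.le_zero.mp hlen)
    subst this
    rw [pvTexA]
    simp [pvLoopA, pvSegsRaw, pvJoinB_single, pvFmtSeg_eq, pvGreekPrefA_eq_any,
          pvTrans, pvUdep, pvBraces]
  | succ m ihm =>
    intro cs hlen
    rcases pvSegsRaw_cases cs with ⟨hfree, heq⟩ | ⟨s, t, rfl, hfree, heq⟩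
    · rw [pvTexA, pvLoopA_free cs hfree, heq]
      simp [pvJoinB_single, pvFmtSeg_eq]
    · have ht : t.length ≤ m := by
        have := hlen
        simp only [List.length_append, List.length_cons] at this
        omega
      rw [pvTexA, pvLoopA_caret s hfree t _ 0, heq]
      rw [List.map_cons,
          pvJoinB_cons _ _ (by simp [pvSegsRaw_ne_nil t]),
          ← ihm t ht, pvFmtSeg_eq, pvGreekPrefA_split]
      simp [List.append_assoc]

-- ===== VERDICT (by name: the statement is the Claim_ definition above) =====
theorem symbol_to_tex_spec : Claim_equal_symbol_to_tex := by
  intro sym _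
  unfold Spec_symbol_to_tex symbol_to_tex symbol_to_tex_alt
  obtain ⟨s0, ss, h⟩ := List.exists_cons_of_ne_nil (pvSegsRaw_ne_nil sym.toList)
  rw [pvMain sym.toList.length sym.toList le_rfl,
      pvSegsB_eq sym.toList [] s0 ss h, h]
  simp
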